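-- pv_equiv track=rewrite | github.com/pbies/bitcoin-tools | _snippets3.py | b58
-- ===== SOURCE A (Python) =====
-- def b58(data):
-- 	B58 = "123456789ABCDEFGHJKLMNPQRSTUVWXYZabcdefghijkmnopqrstuvwxyz"
-- 	if data[0] == 0:
-- 		return "1" + b58(data[1:])
-- 	x = sum([v * (256 ** i) for i, v in enumerate(data[::-1])])
-- 	ret = ""
-- 	while x > 0:
-- 		ret = B58[x % 58] + ret
-- 		x = x // 58
-- 	return ret
-- ===== SOURCE B (Python) =====
-- def b58(data):
--     B58 = "123456789ABCDEFGHJKLMNPQRSTUVWXYZabcdefghijkmnopqrstuvwxyz"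
--     n = 0
--     for v in data:
--         n = n * 256 + v
--     digits = []
--     while n > 0:
--         n, r = divmod(n, 58)
--         digits.append(B58[r])
--     zeros = 0
--     for v in data:
--         if v != 0:
--             break
--         zeros += 1
--     return "1" * zeros + "".join(reversed(digits))
-- ===== Notes on version B (the rewrite author's own statement) =====
-- stated objective: faster
-- what changed: B builds the big integer by Horner's rule (x = x*256 + v, one pass) instead of A's sum of v*256**i with a power recomputed for every byte, counts leading zeros with one scan instead of A's recursive list slicing, and collects base-58 digits in a list joined once instead of repeated string prepends.
-- crash fix: On inputs whose elements are all zero (including the empty list) A raises IndexError (data[0] on the empty tail of the zero-stripping recursion) while B returns '1' repeated len(data) times. — e.g. on b58([0, 0]): A raises IndexError, B returns "11"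
import Mathlib
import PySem

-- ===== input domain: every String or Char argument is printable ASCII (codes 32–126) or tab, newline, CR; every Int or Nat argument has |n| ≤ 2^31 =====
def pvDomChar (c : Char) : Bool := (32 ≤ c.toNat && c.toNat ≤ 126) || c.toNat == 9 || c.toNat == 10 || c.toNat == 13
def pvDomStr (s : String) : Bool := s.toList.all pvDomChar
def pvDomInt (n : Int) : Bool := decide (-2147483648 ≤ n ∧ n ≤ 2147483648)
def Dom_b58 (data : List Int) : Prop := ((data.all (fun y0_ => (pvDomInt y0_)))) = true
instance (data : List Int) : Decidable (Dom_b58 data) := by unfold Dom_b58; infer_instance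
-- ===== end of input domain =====

-- B replaces A's recomputed-power sum by one Horner pass, A's slice-recursion over leading
-- zeros by a counting scan, and A's repeated string prepends by one join (objective: faster).
-- Strings are modelled as their List Char contents, wrapped by String.ofList at the end.

-- the shared base-58 alphabet literal (Python's B58 string, as its characters)
def B58chars : List Char := ['1', '2', '3', '4', '5', '6', '7', '8', '9', 'A', 'B', 'C', 'D', 'E', 'F', 'G', 'H', 'J', 'K', 'L', 'M', 'N', 'P', 'Q', 'R', 'S', 'T', 'U', 'V', 'W', 'X', 'Y', 'Z', 'a', 'b', 'c', 'd', 'e', 'f', 'g', 'h', 'i', 'j', 'k', 'm', 'n', 'o', 'p', 'q', 'r', 's', 't', 'u', 'v', 'w', 'x', 'y', 'z']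

-- ===== PORT A =====
-- A's while loop: ret = B58[x % 58] + ret; x = x // 58.  The index x % 58 lies in [0,58)
-- (Python % with positive divisor), so pyGet? never returns none; .getD ' ' only discharges the Option.
def b58Loop (x : Int) (ret : List Char) : List Char :=
  if _h : 0 < x then
    b58Loop (PySem.Int.floordiv x 58)
      ((PySem.List.pyGet? B58chars (PySem.Int.mod x 58)).getD ' ' :: ret)
  else ret
termination_by x.toNat
decreasing_by
  rw [PySem.Int.floordiv_eq_ediv_of_pos (by norm_num : (0:Int) < 58)]
  omega

-- A's recursion; data[::-1] is List.reverse (PySem.List.slice?_none_none_neg_one) and the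
-- comprehension's enumerate index i is ≥ 0, so 256 ** i is (256:Int) ^ i.toNat exactly.
-- On [] Python's data[0] raises IndexError (outside Pre_b58); the port returns [].
def b58Chars : List Int → List Char
  | [] => []
  | d :: rest =>
    if d = 0 then '1' :: b58Chars rest
    else
      b58Loop (((PySem.List.enumerate (d :: rest).reverse 0).map
        (fun iv => iv.2 * (256:Int) ^ iv.1.toNat)).sum) []

def b58 (data : List Int) : String := String.ofList (b58Chars data)

-- ===== PORT B =====
-- B's digit loop: while n > 0: n, r = divmod(n, 58); digits.append(B58[r])
def b58AltDigits (n : Int) : List Char :=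
  if _h : 0 < n then
    (PySem.List.pyGet? B58chars (PySem.Int.mod n 58)).getD ' ' ::
      b58AltDigits (PySem.Int.floordiv n 58)
  else []
termination_by n.toNat
decreasing_by
  rw [PySem.Int.floordiv_eq_ediv_of_pos (by norm_num : (0:Int) < 58)]
  omega

-- B's leading-zero count (for-loop with break)
def leadZeros : List Int → Nat
  | [] => 0
  | v :: r => if v ≠ 0 then 0 else leadZeros r + 1

def b58_alt (data : List Int) : String :=
  let n := data.foldl (fun n v => n * 256 + v) 0
  String.ofList (List.replicate (leadZeros data) '1' ++ (b58AltDigits n).reverse)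

-- ===== PRECONDITION & SPEC =====
-- Pre_ excludes exactly the inputs where A raises IndexError: lists that are empty or all zeros
-- (the zero-stripping recursion reaches data = [] and evaluates data[0]).
def Pre_b58 (data : List Int) : Prop := ∃ v ∈ data, v ≠ 0
instance (data : List Int) : Decidable (Pre_b58 data) := by unfold Pre_b58; infer_instance
def pvWitness_b58 : List Int := [0, 1, 255]

-- On all-zero inputs (including []) A raises IndexError; B returns '1' repeated len(data) times.
def Raises_b58 (data : List Int) : Prop := ∀ v ∈ data, v = 0
instance (data : List Int) : Decidable (Raises_b58 data) := by unfold Raises_b58; infer_instance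
def pvRaiseWitness_b58 : List Int := [0, 0]
def pvRaiseWitnessOut_b58 : String := "11"

def Spec_b58 (data : List Int) (out : String) : Prop := out = b58_alt data
instance (data : List Int) (out : String) : Decidable (Spec_b58 data out) := by unfold Spec_b58; infer_instance

-- ===== CLAIM (what is proved, stated in full; the proofs are below) =====
def Claim_equal_b58 : Prop := ∀ (data : List Int), Dom_b58 data → Pre_b58 data → Spec_b58 data (b58 data)
def Claim_raises_b58 : Prop := (∀ (data : List Int), Dom_b58 data → Raises_b58 data → ¬ Pre_b58 data) ∧ (Dom_b58 (pvRaiseWitness_b58) ∧ Raises_b58 (pvRaiseWitness_b58) ∧ b58_alt (pvRaiseWitness_b58) = pvRaiseWitnessOut_b58)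

-- ===== LEMMAS AND PROOFS =====

-- the value both programs convert, low-order byte first
def sval : List Int → Int
  | [] => 0
  | v :: r => v + 256 * sval r

theorem sval_append_singleton (m : List Int) (v : Int) :
    sval (m ++ [v]) = sval m + v * (256:Int) ^ m.length := by
  induction m with
  | nil => simp [sval]
  | cons w r ih => simp [sval, ih, pow_succ]; ring

theorem horner_eq (l : List Int) (a : Int) :
    l.foldl (fun n v => n * 256 + v) a = a * (256:Int) ^ l.length + sval l.reverse := by
  induction l generalizing a with
  | nil => simp [sval]
  | cons v r ih =>
    simp only [List.foldl_cons, ih, List.reverse_cons, sval_append_singleton,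
      List.length_reverse, List.length_cons, pow_succ]
    ring

theorem sumA_eq (m : List Int) (k : Nat) :
    ((PySem.List.enumerate m (k : Int)).map (fun iv => iv.2 * (256:Int) ^ iv.1.toNat)).sum
      = (256:Int) ^ k * sval m := by
  induction m generalizing k with
  | nil => simp [PySem.List.enumerate_nil, sval]
  | cons v r ih =>
    rw [PySem.List.enumerate_cons]
    have hk : (k : Int) + 1 = ((k + 1 : Nat) : Int) := by push_cast; ring
    simp only [List.map_cons, List.sum_cons, hk, ih, sval, Int.toNat_natCast, pow_succ]
    ring

theorem b58Loop_eq (x : Int) (ret : List Char) :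
    b58Loop x ret = (b58AltDigits x).reverse ++ ret := by
  induction x, ret using b58Loop.induct with
  | case1 x ret h ih =>
    rw [b58Loop, b58AltDigits, dif_pos h, dif_pos h, ih]
    simp
  | case2 x ret h =>
    rw [b58Loop, b58AltDigits, dif_neg h, dif_neg h]
    simp

theorem b58Chars_eq (data : List Int) (hpre : Pre_b58 data) :
    b58Chars data
      = List.replicate (leadZeros data) '1'
        ++ (b58AltDigits (data.foldl (fun n v => n * 256 + v) 0)).reverse := by
  induction data with
  | nil => exact absurd hpre (by simp [Pre_b58])
  | cons d rest ih =>
    by_cases hd : d = 0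
    · subst hd
      have hpre' : Pre_b58 rest := by
        obtain ⟨v, hv, hne⟩ := hpre
        rw [List.mem_cons] at hv
        rcases hv with rfl | hv
        · exact absurd rfl hne
        · exact ⟨v, hv, hne⟩
      have : (0 :: rest).foldl (fun n v => n * 256 + v) 0
          = rest.foldl (fun n v => n * 256 + v) 0 := by simp
      rw [b58Chars, if_pos rfl, ih hpre', this]
      simp [leadZeros, List.replicate_succ]
    · rw [b58Chars, if_neg hd, b58Loop_eq, List.append_nil]
      have h1 := sumA_eq (d :: rest).reverse 0
      have h2 := horner_eq (d :: rest) 0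
      simp only [Nat.cast_zero, pow_zero, one_mul] at h1
      simp only [zero_mul, zero_add] at h2
      rw [h1, h2]
      have hz : leadZeros (d :: rest) = 0 := by simp [leadZeros, hd]
      rw [hz, List.replicate_zero, List.nil_append]

-- ===== VERDICT (by name: the statement is the Claim_ definition above) =====
theorem b58_spec : Claim_equal_b58 := by
  intro data _ hpre
  unfold Spec_b58 b58 b58_alt
  rw [b58Chars_eq data hpre]

theorem b58_raises : Claim_raises_b58 := by
  unfold Claim_raises_b58
  constructor
  · intro data _ hr ⟨v, hv, hne⟩
    exact hne (hr v hv)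
  · refine ⟨by decide, by decide, ?_⟩
    show b58_alt [0, 0] = "11"
    rw [b58_alt]
    have h0 : b58AltDigits 0 = [] := by rw [b58AltDigits]; simp
    simp only [List.foldl, leadZeros]
    norm_num [h0]
    rfl

-- self-check: the raise witness is inside Dom and inside Raises_ (read off b58_raises)
theorem pvRaiseWitness_ok : Dom_b58 pvRaiseWitness_b58 ∧ Raises_b58 pvRaiseWitness_b58 :=
  ⟨b58_raises.2.1, b58_raises.2.2.1⟩
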